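-- pv_equiv track=rewrite | github.com/sophiamkalil/Code-in-Place---Final-Project | functions.py | calculate_four_of_a_kind_points
-- ===== SOURCE A (Python) =====
-- def calculate_four_of_a_kind_points(dice_faces):
--     total = sum(dice_faces)
--
--     frequencies = {}
--     for face in dice_faces:
--         if face not in frequencies:
--             frequencies[face] = 1
--         else:
--             frequencies[face] += 1
--
--     for count in frequencies.values():
--         if count >= 4:
--             return total
--
--     return 0
-- ===== SOURCE B (Python) =====
-- def calculate_four_of_a_kind_points(dice_faces):
--     total = sum(dice_faces)
--     run = 0
--     prev = None
--     for x in sorted(dice_faces):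
--         run = run + 1 if x == prev else 1
--         if run == 4:
--             return total
--         prev = x
--     return 0
-- ===== Notes on version B (the rewrite author's own statement) =====
-- stated objective: alternative
-- what changed: Replaces the frequency-dictionary (build a counts dict, then scan its values) with a sort-then-run-length scan: walk the sorted hand once keeping the current run length and return the total as soon as a run reaches 4.
import Mathlib
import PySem

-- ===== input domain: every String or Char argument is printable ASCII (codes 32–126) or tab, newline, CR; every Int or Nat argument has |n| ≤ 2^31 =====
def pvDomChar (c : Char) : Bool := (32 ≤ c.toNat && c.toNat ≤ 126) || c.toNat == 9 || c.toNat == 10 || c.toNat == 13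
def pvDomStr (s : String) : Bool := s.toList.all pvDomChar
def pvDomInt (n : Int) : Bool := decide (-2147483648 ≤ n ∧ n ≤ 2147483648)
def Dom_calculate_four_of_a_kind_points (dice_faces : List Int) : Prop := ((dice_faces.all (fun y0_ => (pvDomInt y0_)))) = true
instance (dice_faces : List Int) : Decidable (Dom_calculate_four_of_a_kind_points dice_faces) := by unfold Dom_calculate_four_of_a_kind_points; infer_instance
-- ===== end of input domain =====

-- B replaces A's frequency dictionary by a single run-length scan over the sorted hand (alternative decomposition, same result).

-- ===== PORT A =====
def calculate_four_of_a_kind_points (dice_faces : List Int) : Int :=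
  let total := dice_faces.foldl (· + ·) 0
  let frequencies := dice_faces.foldl
    (fun d face =>
      if d.contains face = false then d.insert face 1
      else d.insert face (d.getD face 0 + 1))
    (PySem.Dict.empty : PySem.Dict Int Int)
  -- early-return loop over the dict's values
  if frequencies.values.any (fun count => decide (4 ≤ count)) then total else 0

-- ===== PORT B =====
-- the for-loop of Source B with its early return: state (prev, run), recursing down the sorted list
def pvScanRun : Option Int → Int → List Int → Bool
  | _, _, [] => false
  | prev, run, x :: xs =>
    let run' := if some x = prev then run + 1 else 1
    if run' = 4 then true else pvScanRun (some x) run' xs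

def calculate_four_of_a_kind_points_alt (dice_faces : List Int) : Int :=
  let total := dice_faces.foldl (· + ·) 0
  if pvScanRun none 0 (PySem.List.sorted dice_faces (fun x => x) false) then total else 0

-- ===== PRECONDITION & SPEC =====
def Spec_calculate_four_of_a_kind_points (dice_faces : List Int) (out : Int) : Prop := out = calculate_four_of_a_kind_points_alt dice_faces
instance (dice_faces : List Int) (out : Int) : Decidable (Spec_calculate_four_of_a_kind_points dice_faces out) := by unfold Spec_calculate_four_of_a_kind_points; infer_instance

-- ===== CLAIM (what is proved, stated in full; the proofs are below) =====
def Claim_equal_calculate_four_of_a_kind_points : Prop := ∀ (dice_faces : List Int), Dom_calculate_four_of_a_kind_points dice_faces → Spec_calculate_four_of_a_kind_points dice_faces (calculate_four_of_a_kind_points dice_faces)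

-- ===== LEMMAS AND PROOFS =====

-- A's dict-building loop builds exactly the counter
lemma pv_foldA_eq_counter (l : List Int) :
    l.foldl
      (fun d face =>
        if d.contains face = false then d.insert face 1
        else d.insert face (d.getD face 0 + 1))
      (PySem.Dict.empty : PySem.Dict Int Int)
    = PySem.Dict.counter l := by
  rw [← PySem.Dict.foldl_insert_getD_add_one_eq_counter]
  suffices h : ∀ d : PySem.Dict Int Int,
      l.foldl (fun d face => if d.contains face = false then d.insert face 1
        else d.insert face (d.getD face 0 + 1)) d
      = l.foldl (fun d x => d.insert x (d.getD x 0 + 1)) d from h _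
  induction l with
  | nil => intro d; rfl
  | cons x xs ih =>
    intro d
    simp only [List.foldl_cons]
    by_cases h : d.contains x
    · simp [h, ih]
    · simp only [Bool.not_eq_true] at h
      rw [if_pos h, ih, show d.insert x 1 = d.insert x (d.getD x 0 + 1) by
        rw [PySem.Dict.getD_of_not_contains (h := h)]; norm_num]

-- A's test ↔ some face occurs ≥ 4 times
lemma pv_A_cond (l : List Int) :
    ((PySem.Dict.counter l).values.any (fun count => decide (4 ≤ count)) = true)
    ↔ ∃ x ∈ l, 4 ≤ l.count x := by
  rw [show (PySem.Dict.counter l).values = ((PySem.Dict.counter l).items).map Prod.snd from rfl,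
      PySem.Dict.items_counter]
  simp only [List.map_map, List.any_eq_true, List.mem_map, Function.comp]
  constructor
  · rintro ⟨c, ⟨k, hk, rfl⟩, hc⟩
    refine ⟨k, (PySem.Set.mem_ofList l k).1 hk, ?_⟩
    simp only [decide_eq_true_eq] at hc
    exact_mod_cast hc
  · rintro ⟨k, hk, hc⟩
    refine ⟨(l.count k : Int), ⟨k, (PySem.Set.mem_ofList l k).2 hk, rfl⟩, ?_⟩
    simp only [decide_eq_true_eq]
    exact_mod_cast hc

-- scan invariant on a sorted tail
lemma pv_scan_inv (p run : Int) (xs : List Int)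
    (h1 : 1 ≤ run) (h3 : run ≤ 3)
    (hs : xs.Pairwise (· ≤ ·)) (hge : ∀ x ∈ xs, p ≤ x) :
    (pvScanRun (some p) run xs = true)
    ↔ (4 ≤ run + (xs.count p : Int)) ∨ ∃ x ∈ xs, x ≠ p ∧ 4 ≤ xs.count x := by
  induction xs generalizing p run with
  | nil => simp [pvScanRun]; omega
  | cons y ys ih =>
    obtain ⟨hyle, hys⟩ := List.pairwise_cons.1 hs
    by_cases hy : y = p
    · subst hy
      simp only [pvScanRun, if_true]
      by_cases h4 : run + 1 = 4
      · rw [if_pos h4]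
        simp only [true_iff]
        left
        rw [List.count_cons_self]
        push_cast
        omega
      · rw [if_neg h4, ih y (run + 1) (by omega) (by omega) hys hyle]
        constructor
        · rintro (h | ⟨x, hx, hxy, hc⟩)
          · left; rw [List.count_cons_self]; push_cast at h ⊢; omega
          · right
            exact ⟨x, List.mem_cons_of_mem _ hx, hxy, by
              rwa [List.count_cons_of_ne (Ne.symm hxy)]⟩
        · rintro (h | ⟨x, hx, hxy, hc⟩)
          · left; rw [List.count_cons_self] at h; push_cast at h ⊢; omega
          · right
            rcases List.mem_cons.1 hx with rfl | hx'
            · exact absurd rfl hxy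
            · exact ⟨x, hx', hxy, by rwa [List.count_cons_of_ne (Ne.symm hxy)] at hc⟩
    · have hpy : p < y := lt_of_le_of_ne (hge y (List.mem_cons_self)) (Ne.symm hy)
      have hnp : p ∉ y :: ys := by
        intro hmem
        rcases List.mem_cons.1 hmem with rfl | hmem'
        · exact hy rfl
        · exact absurd (lt_of_lt_of_le hpy (hyle p hmem')) (lt_irrefl p)
      have hcnt0 : (y :: ys).count p = 0 := List.count_eq_zero.2 hnp
      simp only [pvScanRun, Option.some.injEq, if_neg hy]
      rw [if_neg (by norm_num), ih y 1 (by omega) (by omega) hys hyle]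
      constructor
      · rintro (h | ⟨x, hx, hxy, hc⟩)
        · right
          refine ⟨y, List.mem_cons_self, hy, ?_⟩
          rw [List.count_cons_self]
          omega
        · right
          have hxp : x ≠ p := by
            intro hxp; subst hxp
            exact absurd (lt_of_lt_of_le hpy (hyle x hx)) (lt_irrefl x)
          exact ⟨x, List.mem_cons_of_mem _ hx, hxp, by rwa [List.count_cons_of_ne (Ne.symm hxy)]⟩
      · rintro (h | ⟨x, hx, hxp, hc⟩)
        · rw [hcnt0] at h; push_cast at h; omega
        · rcases List.mem_cons.1 hx with rfl | hx'
          · left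
            rw [List.count_cons_self] at hc
            omega
          · by_cases hxy : x = y
            · subst hxy
              left
              rw [List.count_cons_self] at hc
              omega
            · right
              exact ⟨x, hx', hxy, by rwa [List.count_cons_of_ne (Ne.symm hxy)] at hc⟩

-- B's test on a sorted list ↔ some face occurs ≥ 4 times
lemma pv_B_cond (s : List Int) (hs : s.Pairwise (· ≤ ·)) :
    (pvScanRun none 0 s = true) ↔ ∃ x ∈ s, 4 ≤ s.count x := by
  cases s with
  | nil => simp [pvScanRun]
  | cons y ys =>
    obtain ⟨hyle, hys⟩ := List.pairwise_cons.1 hs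
    simp only [pvScanRun, reduceCtorEq, if_false]
    rw [if_neg (by norm_num), pv_scan_inv y 1 ys (by omega) (by omega) hys hyle]
    constructor
    · rintro (h | ⟨x, hx, hxy, hc⟩)
      · exact ⟨y, List.mem_cons_self, by rw [List.count_cons_self]; omega⟩
      · exact ⟨x, List.mem_cons_of_mem _ hx, by rwa [List.count_cons_of_ne (Ne.symm hxy)]⟩
    · rintro ⟨x, hx, hc⟩
      by_cases hxy : x = y
      · subst hxy
        left
        rw [List.count_cons_self] at hc
        omega
      · right
        rcases List.mem_cons.1 hx with rfl | hx'
        · exact absurd rfl hxy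
        · exact ⟨x, hx', hxy, by rwa [List.count_cons_of_ne (Ne.symm hxy)] at hc⟩

-- ===== VERDICT (by name: the statement is the Claim_ definition above) =====
theorem calculate_four_of_a_kind_points_spec : Claim_equal_calculate_four_of_a_kind_points := by
  intro l _
  unfold Spec_calculate_four_of_a_kind_points
  unfold calculate_four_of_a_kind_points calculate_four_of_a_kind_points_alt
  simp only [pv_foldA_eq_counter]
  have hperm : (PySem.List.sorted l (fun x => x) false).Perm l := PySem.List.sorted_perm l _ _
  have hcond :
      ((PySem.Dict.counter l).values.any (fun count => decide (4 ≤ count)))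
      = pvScanRun none 0 (PySem.List.sorted l (fun x => x) false) := by
    rw [Bool.eq_iff_iff, pv_A_cond,
        pv_B_cond _ (PySem.List.sorted_pairwise l (fun x => x))]
    constructor
    · rintro ⟨x, hx, hc⟩
      exact ⟨x, (PySem.List.mem_sorted l _ _ x).2 hx, by rw [hperm.count_eq]; exact hc⟩
    · rintro ⟨x, hx, hc⟩
      exact ⟨x, (PySem.List.mem_sorted l _ _ x).1 hx, by rw [← hperm.count_eq]; exact hc⟩
  rw [hcond]
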